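-- pv_equiv track=rewrite | github.com/kaxkong/test | main.py | reverse_v2
-- ===== SOURCE A (Python) =====
-- def reverse_v2(s: str):
--     """
--     对中文不友好
--     :param s:
--     :return:
--     """
--     if not s:
--         raise ValueError("不接受非空字符串")
--     chars = s.encode(encoding="utf-8")
--     r_string = list(s)
--     start = 0
--     end = len(r_string) - 1
--     while start < end:
--         if not 33 <= chars[start] <= 122:
--             start += 1
--         elif not 33 <= chars[end] <= 122:
--             end -= 1
--         else:
--             r_string[start], r_string[end] = r_string[end], r_string[start]
--             start += 1
--             end -= 1
--     return "".join(r_string)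
-- ===== SOURCE B (Python) =====
-- def reverse_v2(s: str):
--     if not s:
--         raise ValueError("不接受非空字符串")
--     chars = s.encode(encoding="utf-8")
--     picked = [s[i] for i in range(len(s)) if 33 <= chars[i] <= 122]
--     picked.reverse()
--     it = iter(picked)
--     return "".join(next(it) if 33 <= chars[i] <= 122 else c for i, c in enumerate(s))
-- ===== Notes on version B (the rewrite author's own statement) =====
-- stated objective: alternative
-- what changed: Replaces A's in-place two-pointer swap walk with extract-reverse-refill: collect the qualifying characters left to right, reverse that list, and rebuild the string in one pass feeding the reversed characters back into the qualifying slots; Pre_ excludes only the empty string, on which both A and B raise ValueError.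
import Mathlib
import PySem

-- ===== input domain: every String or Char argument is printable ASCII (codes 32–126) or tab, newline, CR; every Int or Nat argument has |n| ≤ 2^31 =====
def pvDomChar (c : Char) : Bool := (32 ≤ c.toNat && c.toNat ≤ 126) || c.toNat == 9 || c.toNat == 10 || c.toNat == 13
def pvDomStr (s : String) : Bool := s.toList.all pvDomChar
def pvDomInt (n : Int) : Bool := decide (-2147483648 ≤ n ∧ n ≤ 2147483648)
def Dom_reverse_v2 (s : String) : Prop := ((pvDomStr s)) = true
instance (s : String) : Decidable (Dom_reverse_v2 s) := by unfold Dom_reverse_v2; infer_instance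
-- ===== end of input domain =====

-- B replaces A's in-place two-pointer swap walk by an extract-reverse-refill pass:
-- collect the qualifying characters, reverse the list, and rebuild the string in one
-- left-to-right pass feeding them back into the qualifying slots (objective: alternative).
-- A raises ValueError on the empty string (and so does B): Pre_ excludes it.

-- ===== PORT A =====
-- s.encode("utf-8"): byte values of one char (exact UTF-8)
def pvUtf8Char (c : Char) : List Nat :=
  let n := c.toNat
  if n < 0x80 then [n]
  else if n < 0x800 then [0xC0 ||| (n >>> 6), 0x80 ||| (n &&& 0x3F)]
  else if n < 0x10000 then
    [0xE0 ||| (n >>> 12), 0x80 ||| ((n >>> 6) &&& 0x3F), 0x80 ||| (n &&& 0x3F)]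
  else
    [0xF0 ||| (n >>> 18), 0x80 ||| ((n >>> 12) &&& 0x3F),
     0x80 ||| ((n >>> 6) &&& 0x3F), 0x80 ||| (n &&& 0x3F)]

def pvBytes (l : List Char) : List Nat := l.flatMap pvUtf8Char

-- "33 <= chars[i] <= 122" (the index is always in range: the byte list is at least as long
-- as the char list, so Python raises no IndexError here)
def pvQual (bytes : List Nat) (i : Nat) : Bool :=
  decide (33 ≤ bytes.getD i 0 ∧ bytes.getD i 0 ≤ 122)

-- A's while loop: two pointers walking inwards, swapping qualifying characters
def pvLoopA (q : Nat → Bool) (arr : List Char) (s e : Nat) : List Char :=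
  if _h : s < e then
    if !(q s) then pvLoopA q arr (s+1) e
    else if !(q e) then pvLoopA q arr s (e-1)
    else pvLoopA q ((arr.set s (arr.getD e ' ')).set e (arr.getD s ' ')) (s+1) (e-1)
  else arr
termination_by e - s
decreasing_by all_goals omega

def reverse_v2 (s : String) : String :=
  let l := s.toList
  let q := pvQual (pvBytes l)
  String.ofList (pvLoopA q l 0 (l.length - 1))

-- ===== PORT B =====
-- the join over "next(it) if qual(i) else c for i, c in enumerate(s)": one pass over the
-- characters, consuming the reversed picked list at qualifying indices
def pvRefill (q : Nat → Bool) : Nat → List Char → List Char → List Char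
  | _, [], _ => []
  | i, c :: t, qs =>
    if q i then qs.headD c :: pvRefill q (i+1) t qs.tail
    else c :: pvRefill q (i+1) t qs

def reverse_v2_alt (s : String) : String :=
  let l := s.toList
  let q := pvQual (pvBytes l)
  -- picked = [s[i] for i in range(len(s)) if qual(i)]; picked.reverse()
  -- (the index is always in range, so getD's default is never used)
  let picked := ((List.range l.length).filter q).map (fun i => l.getD i ' ')
  String.ofList (pvRefill q 0 l picked.reverse)

-- ===== PRECONDITION & SPEC =====
-- Pre_ excludes only the empty string, on which A raises ValueError (B raises it too).
def Pre_reverse_v2 (s : String) : Prop := s ≠ ""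
instance (s : String) : Decidable (Pre_reverse_v2 s) := by unfold Pre_reverse_v2; infer_instance
def pvWitness_reverse_v2 : String := "ab !c"

def Spec_reverse_v2 (s : String) (out : String) : Prop := out = reverse_v2_alt s
instance (s : String) (out : String) : Decidable (Spec_reverse_v2 s out) := by unfold Spec_reverse_v2; infer_instance

-- ===== CLAIM (what is proved, stated in full; the proofs are below) =====
def Claim_equal_reverse_v2 : Prop := ∀ (s : String), Dom_reverse_v2 s → Pre_reverse_v2 s → Spec_reverse_v2 s (reverse_v2 s)

-- ===== LEMMAS AND PROOFS =====

-- proof-only intermediate form of A's loop: scatter the picked values back reversed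
def pvScatter (arr : List Char) (ps : List Nat) : List Char :=
  let vals := ps.map (fun i => arr.getD i ' ')
  (ps.zip vals.reverse).foldl (fun acc pv => acc.set pv.1 pv.2) arr

theorem pv_getD_set_ne (l : List Char) (i j : Nat) (v d : Char) (h : i ≠ j) :
    (l.set j v).getD i d = l.getD i d := by
  simp [List.getD, List.getElem?_set_ne (Ne.symm h)]

-- a set at an index untouched by the fold commutes out of the fold
theorem pv_foldl_set_comm (ps : List (Nat × Char)) (arr : List Char) (j : Nat) (v : Char)
    (h : ∀ p ∈ ps, p.1 ≠ j) :
    ps.foldl (fun acc pv => acc.set pv.1 pv.2) (arr.set j v)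
      = (ps.foldl (fun acc pv => acc.set pv.1 pv.2) arr).set j v := by
  induction ps generalizing arr with
  | nil => rfl
  | cons p t ih =>
    simp only [List.foldl_cons]
    rw [List.set_comm v p.2 (Ne.symm (h p (by simp)))]
    exact ih _ (fun p hp => h p (by simp [hp]))

theorem pv_scatter_nil (arr : List Char) : pvScatter arr [] = arr := by
  simp [pvScatter]

theorem pv_scatter_single (arr : List Char) (p : Nat) (h : p < arr.length) :
    pvScatter arr [p] = arr := by
  simp only [pvScatter, List.map_cons, List.map_nil, List.reverse_cons, List.reverse_nil,
    List.nil_append, List.zip_cons_cons, List.zip_nil_right, List.foldl_cons, List.foldl_nil]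
  rw [List.getD_eq_getElem arr ' ' h]
  exact List.set_getElem_self h

-- reversing a scatter list (s :: mid ++ [e]) = swap s,e first, then scatter mid
theorem pv_scatter_swap (arr : List Char) (s e : Nat) (mid : List Nat)
    (hmid : ∀ p ∈ mid, p ≠ s ∧ p ≠ e) :
    pvScatter arr (s :: (mid ++ [e]))
      = pvScatter ((arr.set s (arr.getD e ' ')).set e (arr.getD s ' ')) mid := by
  have hf : mid.map (fun i => ((arr.set s (arr.getD e ' ')).set e (arr.getD s ' ')).getD i ' ')
      = mid.map (fun i => arr.getD i ' ') := by
    apply List.map_congr_left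
    intro p hp
    rw [pv_getD_set_ne _ _ _ _ _ (hmid p hp).2, pv_getD_set_ne _ _ _ _ _ (hmid p hp).1]
  unfold pvScatter
  simp only [hf]
  have hvals : ((s :: (mid ++ [e])).map (fun i => arr.getD i ' ')).reverse
      = arr.getD e ' ' :: ((mid.map (fun i => arr.getD i ' ')).reverse ++ [arr.getD s ' ']) := by
    simp
  rw [hvals, List.zip_cons_cons, List.zip_append (by simp)]
  simp only [List.zip_cons_cons, List.zip_nil_right, List.foldl_cons, List.foldl_append,
    List.foldl_nil]
  refine (pv_foldl_set_comm _ _ e _ ?_).symm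
  intro p hp
  obtain ⟨a, b⟩ := p
  exact (hmid a (List.of_mem_zip hp).1).2

theorem pv_main (q : Nat → Bool) :
    ∀ (n : Nat) (arr : List Char) (s e : Nat), e - s ≤ n → e < arr.length →
      pvLoopA q arr s e = pvScatter arr ((List.range' s (e+1-s)).filter q) := by
  intro n
  induction n with
  | zero =>
    intro arr s e hn he
    have hse : ¬ s < e := by omega
    rw [pvLoopA, dif_neg hse]
    by_cases hes : s = e
    · subst hes
      have h1 : s + 1 - s = 1 := by omega
      have hr1 : List.range' s 1 = [s] := by simp
      rw [h1, hr1, List.filter_cons, List.filter_nil]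
      by_cases hq : q s = true
      · rw [if_pos (by simp [hq]), pv_scatter_single arr s he]
      · rw [if_neg (by simp [hq]), pv_scatter_nil]
    · have h0 : e + 1 - s = 0 := by omega
      rw [h0]
      simp [pv_scatter_nil, List.range']
  | succ n ih =>
    intro arr s e hn he
    by_cases hse : s < e
    · rw [pvLoopA, dif_pos hse]
      have hrange : List.range' s (e+1-s) = s :: (List.range' (s+1) (e-1-s) ++ [e]) := by
        have h1 : e + 1 - s = (e - s) + 1 := by omega
        have h2 : e - s = (e - 1 - s) + 1 := by omega
        have h3 : s + 1 + 1 * (e - 1 - s) = e := by omega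
        rw [h1, List.range'_succ, h2, List.range'_concat, h3]
      by_cases hqs : q s = true
      · by_cases hqe : q e = true
        · -- swap case
          rw [if_neg (by simp [hqs]), if_neg (by simp [hqe])]
          have ha1 : e - 1 - (s + 1) ≤ n := by omega
          have ha2 : e - 1 < ((arr.set s (arr.getD e ' ')).set e (arr.getD s ' ')).length := by
            simp only [List.length_set]; omega
          rw [ih ((arr.set s (arr.getD e ' ')).set e (arr.getD s ' ')) (s+1) (e-1) ha1 ha2]
          have hfilter : (List.range' s (e+1-s)).filter q
              = s :: ((List.range' (s+1) (e-1-s)).filter q ++ [e]) := by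
            rw [hrange, List.filter_cons, List.filter_append, List.filter_cons, List.filter_nil]
            simp [hqs, hqe]
          rw [hfilter, pv_scatter_swap arr s e _ ?_]
          · have hm : e - 1 + 1 - (s + 1) = e - 1 - s := by omega
            rw [hm]
          · intro p hp
            have := List.mem_range'_1.mp (List.mem_filter.mp hp).1
            exact ⟨by omega, by omega⟩
        · -- skip right end
          rw [if_neg (by simp [hqs]), if_pos (by simp [hqe])]
          have hb1 : e - 1 - s ≤ n := by omega
          have hb2 : e - 1 < arr.length := by omega
          rw [ih arr s (e-1) hb1 hb2]
          congr 1
          have h1 : List.range' s (e+1-s) = List.range' s (e-s) ++ [e] := by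
            have h2 : e + 1 - s = (e - s) + 1 := by omega
            have h4 : s + 1 * (e - s) = e := by omega
            rw [h2, List.range'_concat, h4]
          have h3 : e - 1 + 1 - s = e - s := by omega
          rw [h1, h3, List.filter_append, List.filter_cons, List.filter_nil]
          simp [hqe]
      · -- skip left end
        rw [if_pos (by simp [hqs])]
        have hc1 : e - (s + 1) ≤ n := by omega
        rw [ih arr (s+1) e hc1 he]
        congr 1
        have h1 : e + 1 - s = (e - s) + 1 := by omega
        have h2 : e + 1 - (s+1) = e - s := by omega
        rw [h1, List.range'_succ, h2, List.filter_cons]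
        simp [hqs]
    · have := ih arr s e (by omega) he
      rw [pvLoopA, dif_neg hse] at this
      rw [pvLoopA, dif_neg hse]
      exact this

-- ===== bridging the scatter form to B's refill pass =====

theorem pv_refill_length (q : Nat → Bool) (l : List Char) :
    ∀ (i : Nat) (qs : List Char), (pvRefill q i l qs).length = l.length := by
  induction l with
  | nil => intro i qs; rfl
  | cons c t ih =>
    intro i qs
    rw [pvRefill]
    by_cases h : q i = true
    · simp [h, ih]
    · simp [h, ih]

theorem pv_fold_set_length (ps : List (Nat × Char)) (arr : List Char) :
    (ps.foldl (fun acc pv => acc.set pv.1 pv.2) arr).length = arr.length := by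
  induction ps generalizing arr with
  | nil => rfl
  | cons p t ih => simp [List.foldl_cons, ih]

-- refill, pointwise: position j gets qs[#qualifying indices in [i, i+j)] if j qualifies
theorem pv_refill_getD (q : Nat → Bool) :
    ∀ (l : List Char) (i : Nat) (qs : List Char) (j : Nat), j < l.length →
      (pvRefill q i l qs).getD j ' '
        = if q (i + j) then qs.getD (((List.range' i j).filter q).length) (l.getD j ' ')
          else l.getD j ' ' := by
  intro l
  induction l with
  | nil => intro i qs j hj; simp at hj
  | cons c t ih =>
    intro i qs j hj
    rw [pvRefill]
    cases j with
    | zero =>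
      simp only [Nat.add_zero, List.range'_zero, List.filter_nil, List.length_nil, List.getD]
      by_cases h : q i = true
      · simp only [h, if_true]
        cases qs <;> simp
      · simp [h]
    | succ j =>
      have hjt : j < t.length := by simpa using hj
      have hrs : List.range' i (j+1) = i :: List.range' (i+1) j := List.range'_succ
      by_cases h : q i = true
      · simp only [h, if_true]
        have := ih (i+1) qs.tail j hjt
        simp only [List.getD_cons_succ]
        rw [this]
        have hcnt : ((List.range' i (j+1)).filter q).length
            = ((List.range' (i+1) j).filter q).length + 1 := by
          rw [hrs, List.filter_cons, if_pos (by simp [h])]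
          simp
        rw [hcnt, show i + (j+1) = (i+1) + j by omega]
        by_cases h2 : q (i+1+j) = true
        · cases qs <;> simp [h2, List.getD]
        · simp [h2]
      · simp only [h, if_false, Bool.false_eq_true]
        have := ih (i+1) qs j hjt
        simp only [List.getD_cons_succ]
        rw [this]
        have hcnt : ((List.range' i (j+1)).filter q).length
            = ((List.range' (i+1) j).filter q).length := by
          rw [hrs, List.filter_cons, if_neg (by simp [h])]
        rw [hcnt, show i + (j+1) = (i+1) + j by omega]

-- scatter fold, pointwise: nodup keys, key present → its paired value
theorem pv_fold_set_getD_notmem (ps : List Nat) :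
    ∀ (ws arr : List Char) (j : Nat), j ∉ ps →
      ((ps.zip ws).foldl (fun acc pv => acc.set pv.1 pv.2) arr).getD j ' ' = arr.getD j ' ' := by
  induction ps with
  | nil => intro ws arr j hj; rfl
  | cons p t ih =>
    intro ws arr j hj
    cases ws with
    | nil => rfl
    | cons w ws' =>
      rw [List.zip_cons_cons, List.foldl_cons, ih ws' _ j (by simp at hj; exact hj.2)]
      exact pv_getD_set_ne _ _ _ _ _ (by simp at hj; exact hj.1)

theorem pv_fold_set_getD_mem (ps : List Nat) :
    ∀ (ws arr : List Char) (j : Nat), ps.Nodup → ws.length = ps.length → j ∈ ps →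
      j < arr.length →
      ((ps.zip ws).foldl (fun acc pv => acc.set pv.1 pv.2) arr).getD j ' '
        = ws.getD (ps.idxOf j) ' ' := by
  induction ps with
  | nil => intro ws arr j _ _ hj; simp at hj
  | cons p t ih =>
    intro ws arr j hnd hlen hj hja
    cases ws with
    | nil => simp at hlen
    | cons w ws' =>
      rw [List.zip_cons_cons, List.foldl_cons]
      by_cases hpj : j = p
      · subst hpj
        have hnot : j ∉ t := (List.nodup_cons.mp hnd).1
        rw [pv_fold_set_getD_notmem t ws' _ j hnot]
        simp [List.getD, hja]
      · have hjt : j ∈ t := by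
          rcases List.mem_cons.mp hj with h | h
          · exact absurd h hpj
          · exact h
        rw [ih ws' _ j (List.nodup_cons.mp hnd).2 (by simpa using hlen) hjt
          (by simpa using hja)]
        rw [List.idxOf_cons_ne _ (by omega)]
        simp [List.getD]

-- index of j in a filtered range' = number of qualifying indices before j
theorem pv_idxOf_filter_range' (q : Nat → Bool) :
    ∀ (n i j : Nat), i ≤ j → j < i + n → q j = true →
      ((List.range' i n).filter q).idxOf j = ((List.range' i (j - i)).filter q).length := by
  intro n
  induction n with
  | zero => intro i j h1 h2; omega
  | succ n ih =>
    intro i j h1 h2 hq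
    rw [List.range'_succ, List.filter_cons]
    by_cases hij : j = i
    · subst hij
      rw [if_pos (by simp [hq])]
      simp [List.idxOf_cons_self]
    · have hrj : List.range' i (j - i) = i :: List.range' (i+1) (j - (i+1)) := by
        have h3 : j - i = (j - (i+1)) + 1 := by omega
        rw [h3, List.range'_succ]
      have hrec := ih (i+1) j (by omega) (by omega) hq
      by_cases hqi : q i = true
      · rw [if_pos (by simp [hqi]), List.idxOf_cons_ne _ (by omega), hrec, hrj,
          List.filter_cons, if_pos (by simp [hqi])]
        simp
      · rw [if_neg (by simp [hqi]), hrec, hrj, List.filter_cons, if_neg (by simp [hqi])]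

theorem pv_scatter_eq_refill (q : Nat → Bool) (arr : List Char) :
    pvScatter arr ((List.range arr.length).filter q)
      = pvRefill q 0 arr (((List.range arr.length).filter q).map (fun i => arr.getD i ' ')).reverse := by
  apply List.ext_getElem?
  intro j
  have hps : ((List.range arr.length).filter q).Nodup :=
    (List.nodup_range).filter _
  have hlenS : (pvScatter arr ((List.range arr.length).filter q)).length = arr.length := by
    unfold pvScatter
    exact pv_fold_set_length _ _
  have hlenR : (pvRefill q 0 arr
      (((List.range arr.length).filter q).map (fun i => arr.getD i ' ')).reverse).length
      = arr.length := pv_refill_length q arr 0 _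
  by_cases hj : j < arr.length
  · rw [List.getElem?_eq_getElem (by omega), List.getElem?_eq_getElem (by omega)]
    congr 1
    rw [← List.getD_eq_getElem _ ' ' , ← List.getD_eq_getElem _ ' ']
    rw [pv_refill_getD q arr 0 _ j hj]
    by_cases hqj : q j = true
    · -- j qualifies
      have hmem : j ∈ (List.range arr.length).filter q := by
        rw [List.mem_filter, List.mem_range]; exact ⟨hj, hqj⟩
      have hidx : ((List.range arr.length).filter q).idxOf j
          = ((List.range' 0 j).filter q).length := by
        have := pv_idxOf_filter_range' q arr.length 0 j (by omega) (by omega) hqj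
        simpa [List.range_eq_range'] using this
      have hidxlt : ((List.range arr.length).filter q).idxOf j
          < ((List.range arr.length).filter q).length := List.idxOf_lt_length_of_mem hmem
      unfold pvScatter
      rw [pv_fold_set_getD_mem _ _ arr j hps (by simp) hmem hj]
      simp only [Nat.zero_add, hqj, if_true]
      rw [← hidx]
      have hlt : ((List.range arr.length).filter q).idxOf j
          < (((List.range arr.length).filter q).map (fun i => arr.getD i ' ')).reverse.length := by
        simpa using hidxlt
      rw [List.getD_eq_getElem _ _ hlt, List.getD_eq_getElem _ _ (by simpa using hidxlt)]
    · -- j does not qualify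
      have hnot : j ∉ (List.range arr.length).filter q := by
        rw [List.mem_filter]
        intro h
        exact absurd h.2 (by simp [hqj])
      unfold pvScatter
      rw [pv_fold_set_getD_notmem _ _ arr j hnot]
      simp [hqj]
  · rw [List.getElem?_eq_none (by omega), List.getElem?_eq_none (by omega)]

-- ===== VERDICT (by name: the statement is the Claim_ definition above) =====
theorem reverse_v2_spec : Claim_equal_reverse_v2 := by
  intro s _ hpre
  unfold Spec_reverse_v2
  simp only [reverse_v2, reverse_v2_alt]
  have hne : s.toList ≠ [] := by
    intro h
    exact hpre (String.toList_eq_nil_iff.mp h)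
  have hlen : 0 < s.toList.length := List.length_pos_iff.mpr hne
  rw [pv_main (pvQual (pvBytes s.toList)) (s.toList.length) s.toList 0 (s.toList.length - 1)
    (by omega) (by omega)]
  have h5 : s.toList.length - 1 + 1 - 0 = s.toList.length := by omega
  rw [h5, ← List.range_eq_range', pv_scatter_eq_refill]
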